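-- pv_equiv track=rewrite | github.com/2do1/Algorithm | Baekjoon/String/4659 비밀번호 발음하기/solution.py | check_same_alphabet_two_times
-- ===== SOURCE A (Python) =====
-- def check_same_alphabet_two_times(word):
--     for index in range(len(word) - 1):
--         sub_string = word[index:index + 2]
--         if sub_string == word[index] * 2:
--             if sub_string == "ee" or sub_string == "oo":
--                 continue
--             return False
--     return True
-- ===== SOURCE B (Python) =====
-- def check_same_alphabet_two_times(word):
--     i = 0
--     n = len(word)
--     while i < n:
--         j = i
--         while j < n and word[j] == word[i]:
--             j += 1
--         if j - i >= 2 and word[i] != 'e' and word[i] != 'o':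
--             return False
--         i = j
--     return True
-- ===== Notes on version B (the rewrite author's own statement) =====
-- stated objective: alternative
-- what changed: Replaced the adjacent-pair slice comparison with a two-pointer run-length scan: each maximal run of identical characters is measured once and rejected iff its length is at least 2 and its character is neither 'e' nor 'o'.
import Mathlib
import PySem

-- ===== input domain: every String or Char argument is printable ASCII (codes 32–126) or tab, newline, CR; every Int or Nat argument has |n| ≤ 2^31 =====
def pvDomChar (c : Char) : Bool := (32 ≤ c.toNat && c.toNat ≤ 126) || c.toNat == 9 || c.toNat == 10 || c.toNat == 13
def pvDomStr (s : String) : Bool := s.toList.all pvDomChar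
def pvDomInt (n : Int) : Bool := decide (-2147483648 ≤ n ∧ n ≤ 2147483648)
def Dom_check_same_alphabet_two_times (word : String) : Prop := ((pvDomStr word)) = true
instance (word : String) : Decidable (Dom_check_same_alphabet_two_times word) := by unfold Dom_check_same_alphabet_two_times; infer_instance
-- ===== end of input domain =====

-- B replaces A's adjacent-pair slice scan with a two-pointer run-length scan (return value identical; no speed claim).


-- ===== PORT A =====
-- loop over adjacent pairs: the obvious structural recursion on the character list;
-- sub_string = word[index:index+2] is the two-element list [c1, c2], word[index]*2 is [c1, c1]
def aLoop : List Char → Bool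
  | [] => true
  | [_] => true
  | c1 :: c2 :: rest =>
      if [c1, c2] = [c1, c1] then
        if [c1, c2] = ['e', 'e'] ∨ [c1, c2] = ['o', 'o'] then aLoop (c2 :: rest)
        else false
      else aLoop (c2 :: rest)

def check_same_alphabet_two_times (word : String) : Bool := aLoop word.toList

-- ===== PORT B =====
-- two-pointer run-length scan: word[i..j) is the maximal run, here takeWhile/dropWhile
def bLoop : List Char → Bool
  | [] => true
  | c :: rest =>
      if (rest.takeWhile (· == c)).length + 1 ≥ 2 ∧ c ≠ 'e' ∧ c ≠ 'o' then false
      else bLoop (rest.dropWhile (· == c))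
termination_by cs => cs.length
decreasing_by
  simp only [List.length_cons]
  exact Nat.lt_succ_of_le (List.length_dropWhile_le _ _)

def check_same_alphabet_two_times_alt (word : String) : Bool := bLoop word.toList

-- ===== PRECONDITION & SPEC =====
def Spec_check_same_alphabet_two_times (word : String) (out : Bool) : Prop := out = check_same_alphabet_two_times_alt word
instance (word : String) (out : Bool) : Decidable (Spec_check_same_alphabet_two_times word out) := by unfold Spec_check_same_alphabet_two_times; infer_instance

-- ===== CLAIM (what is proved, stated in full; the proofs are below) =====
def Claim_equal_check_same_alphabet_two_times : Prop := ∀ (word : String), Dom_check_same_alphabet_two_times word → Spec_check_same_alphabet_two_times word (check_same_alphabet_two_times word)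

-- ===== LEMMAS AND PROOFS =====

lemma bLoop_cons_cons_eo (c : Char) (rest : List Char) (h : c = 'e' ∨ c = 'o') :
    bLoop (c :: c :: rest) = bLoop (c :: rest) := by
  rw [bLoop, bLoop]
  rcases h with h | h <;> simp [h]

theorem loop_eq : ∀ cs : List Char, aLoop cs = bLoop cs
  | [] => by simp [aLoop, bLoop]
  | [c] => by
      rw [aLoop, bLoop]
      simp [bLoop]
  | c1 :: c2 :: rest => by
      have ih := loop_eq (c2 :: rest)
      by_cases hc : c2 = c1
      · subst hc
        by_cases he : c2 = 'e' ∨ c2 = 'o'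
        · -- allowed doubled run ('ee'/'oo'): A steps one char, B skips the run
          have heo : [c2, c2] = ['e', 'e'] ∨ [c2, c2] = ['o', 'o'] := by
            rcases he with h | h
            · exact Or.inl (by simp [h])
            · exact Or.inr (by simp [h])
          rw [aLoop]
          simp only [if_pos heo, if_pos]
          rw [ih, bLoop_cons_cons_eo _ _ he]
        · -- forbidden doubled pair: both return false
          rw [not_or] at he
          rw [aLoop, bLoop]
          simp [he.1, he.2]
      · -- distinct adjacent characters: both step to c2 :: rest
        rw [aLoop, bLoop]
        simp [hc, ih]
termination_by cs => cs.length

-- ===== VERDICT (by name: the statement is the Claim_ definition above) =====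
theorem check_same_alphabet_two_times_spec : Claim_equal_check_same_alphabet_two_times := by
  intro word _
  unfold Spec_check_same_alphabet_two_times check_same_alphabet_two_times check_same_alphabet_two_times_alt
  exact loop_eq _
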